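-- pv_equiv track=rewrite | github.com/HBinhCT/Q-project | hackerrank/Algorithms/Angry Children 2/solution.py | angryChildren
-- ===== SOURCE A (Python) =====
-- def angryChildren(k, packets):
--     packets.sort()
--     total = 0
--     difference = 0
--     for i in range(k - 1, -1, -1):
--         difference += abs(packets[i] * (k - 1 - i) - total)
--         total += packets[i]
--     res = difference
--     for i in range(k, len(packets)):
--         total -= packets[i - k]
--         difference -= abs(total - packets[i - k] * (k - 1))
--         difference += abs(total - packets[i] * (k - 1))
--         res = min(res, difference)
--         total += packets[i]
--     return res
-- ===== SOURCE B (Python) =====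
-- def angryChildren(k, packets):
--     packets.sort()
--     n = len(packets)
--     P = [0]
--     Q = [0]
--     for idx, p in enumerate(packets):
--         P.append(P[-1] + p)
--         Q.append(Q[-1] + idx * p)
--     return min(2 * (Q[j + k] - Q[j]) - (2 * j + k - 1) * (P[j + k] - P[j])
--                for j in range(n - k + 1))
-- ===== Notes on version B (the rewrite author's own statement) =====
-- stated objective: alternative
-- what changed: Replaces A's incremental abs-based sliding-window update with prefix-sum arrays (sum and index-weighted sum) and a closed-form O(1) unfairness formula per window, taking a min over window starts.
import Mathlib
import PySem

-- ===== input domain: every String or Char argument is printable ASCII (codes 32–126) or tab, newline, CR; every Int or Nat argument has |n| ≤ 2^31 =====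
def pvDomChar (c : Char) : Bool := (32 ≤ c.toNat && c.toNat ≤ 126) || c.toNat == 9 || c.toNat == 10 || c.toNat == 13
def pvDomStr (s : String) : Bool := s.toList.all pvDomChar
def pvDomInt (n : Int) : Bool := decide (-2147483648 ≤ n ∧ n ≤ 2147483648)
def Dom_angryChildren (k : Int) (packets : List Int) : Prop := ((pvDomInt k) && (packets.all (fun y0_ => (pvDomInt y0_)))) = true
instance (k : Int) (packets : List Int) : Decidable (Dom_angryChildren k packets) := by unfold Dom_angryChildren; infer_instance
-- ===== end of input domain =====

-- B replaces A's incremental abs-based sliding-window update with prefix sums and a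
-- closed-form per-window unfairness (objective: alternative decomposition, same cost).
-- A sorts `packets` in place (B does too); the equivalence proved here is about the return value.

-- ===== PORT A =====
def angryChildren (k : Int) (packets : List Int) : Int :=
  let s := PySem.List.sorted packets (fun x => x) false
  let init := (PySem.List.pyRange (k - 1) (-1) (-1)).foldl
    (fun (st : Int × Int) i =>
      (st.1 + PySem.List.pyGetD s i 0,
       st.2 + |PySem.List.pyGetD s i 0 * (k - 1 - i) - st.1|)) (0, 0)
  let fin := (PySem.List.pyRange k (s.length : Int) 1).foldl
    (fun (st : Int × Int × Int) i =>
      let t := st.1 - PySem.List.pyGetD s (i - k) 0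
      let d := st.2.1 - |t - PySem.List.pyGetD s (i - k) 0 * (k - 1)|
                      + |t - PySem.List.pyGetD s i 0 * (k - 1)|
      (t + PySem.List.pyGetD s i 0, d, min st.2.2 d)) (init.1, init.2, init.2)
  fin.2.2

-- ===== PORT B =====
def angryChildren_alt (k : Int) (packets : List Int) : Int :=
  let s := PySem.List.sorted packets (fun x => x) false
  let n : Int := s.length
  let pq := (PySem.List.enumerate s).foldl
    (fun (pq : List Int × List Int) ip =>
      (pq.1 ++ [PySem.List.pyGetD pq.1 (-1) 0 + ip.2],
       pq.2 ++ [PySem.List.pyGetD pq.2 (-1) 0 + ip.1 * ip.2])) ([0], [0])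
  let vals := (PySem.List.pyRange 0 (n - k + 1) 1).map (fun j =>
      2 * (PySem.List.pyGetD pq.2 (j + k) 0 - PySem.List.pyGetD pq.2 j 0)
      - (2 * j + k - 1) * (PySem.List.pyGetD pq.1 (j + k) 0 - PySem.List.pyGetD pq.1 j 0))
  (PySem.List.min? vals (fun x => x)).getD 0

-- ===== PRECONDITION & SPEC =====
-- A raises IndexError whenever k < 0 (the second loop reaches index n-1-k ≥ n) or k > len(packets)
-- (the first loop indexes packets[k-1]); Pre_ is exactly where A returns normally.
def Pre_angryChildren (k : Int) (packets : List Int) : Prop :=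
  0 ≤ k ∧ k ≤ (packets.length : Int)
instance (k : Int) (packets : List Int) : Decidable (Pre_angryChildren k packets) := by
  unfold Pre_angryChildren; infer_instance
def pvWitness_angryChildren : Int × List Int := (2, [10, 100, 300, 200, 1000, 20, 30])

def Spec_angryChildren (k : Int) (packets : List Int) (out : Int) : Prop := out = angryChildren_alt k packets
instance (k : Int) (packets : List Int) (out : Int) : Decidable (Spec_angryChildren k packets out) := by unfold Spec_angryChildren; infer_instance

-- ===== CLAIM (what is proved, stated in full; the proofs are below) =====
def Claim_equal_angryChildren : Prop := ∀ (k : Int) (packets : List Int), Dom_angryChildren k packets → Pre_angryChildren k packets → Spec_angryChildren k packets (angryChildren k packets)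

-- ===== LEMMAS AND PROOFS =====

-- prefix sum of the first m entries, and the index-weighted prefix sum Σ_{i<m} (b+i)·s[i]
def Psum (s : List Int) (m : Nat) : Int := ((List.range m).map (fun i : Nat => s.getD i 0)).sum
def Qgen (b : Int) (s : List Int) (m : Nat) : Int :=
  ((List.range m).map (fun i : Nat => (b + (i : Int)) * s.getD i 0)).sum

-- closed-form unfairness of the sorted window [j, j+K)
def Fwin (s : List Int) (K j : Nat) : Int :=
  2 * (Qgen 0 s (j + K) - Qgen 0 s j)
  - (2 * (j : Int) + (K : Int) - 1) * (Psum s (j + K) - Psum s j)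

theorem Psum_succ (s : List Int) (m : Nat) : Psum s (m + 1) = Psum s m + s.getD m 0 := by
  simp [Psum, List.range_succ]

theorem Qgen_succ (b : Int) (s : List Int) (m : Nat) :
    Qgen b s (m + 1) = Qgen b s m + (b + (m : Int)) * s.getD m 0 := by
  simp [Qgen, List.range_succ]

theorem Psum_cons (x : Int) (t : List Int) (m : Nat) :
    Psum (x :: t) (m + 1) = x + Psum t m := by
  induction m with
  | zero => simp [Psum]
  | succ m ih =>
    rw [Psum_succ, ih, Psum_succ, List.getD_cons_succ]
    ring

theorem Qgen_cons (b x : Int) (t : List Int) (m : Nat) :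
    Qgen b (x :: t) (m + 1) = b * x + Qgen (b + 1) t m := by
  induction m with
  | zero => simp [Qgen]
  | succ m ih =>
    rw [Qgen_succ, ih, Qgen_succ, List.getD_cons_succ]
    push_cast; ring

theorem psum_le_const (s : List Int) (c : Int) (a b : Nat) (hab : a ≤ b)
    (h : ∀ m, a ≤ m → m < b → s.getD m 0 ≤ c) :
    Psum s b - Psum s a ≤ c * ((b : Int) - (a : Int)) := by
  induction b with
  | zero => interval_cases a; simp
  | succ b ih =>
    rcases Nat.lt_or_ge a (b + 1) with hlt | hge
    · have hab' : a ≤ b := by omega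
      have := ih hab' (fun m hm1 hm2 => h m hm1 (by omega))
      have hb := h b (by omega) (by omega)
      rw [Psum_succ]; push_cast; nlinarith
    · have : a = b + 1 := by omega
      subst this; simp

theorem psum_ge_const (s : List Int) (c : Int) (a b : Nat) (hab : a ≤ b)
    (h : ∀ m, a ≤ m → m < b → c ≤ s.getD m 0) :
    c * ((b : Int) - (a : Int)) ≤ Psum s b - Psum s a := by
  induction b with
  | zero => interval_cases a; simp
  | succ b ih =>
    rcases Nat.lt_or_ge a (b + 1) with hlt | hge
    · have hab' : a ≤ b := by omega
      have := ih hab' (fun m hm1 hm2 => h m hm1 (by omega))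
      have hb := h b (by omega) (by omega)
      rw [Psum_succ]; push_cast; nlinarith
    · have : a = b + 1 := by omega
      subst this; simp

-- lower bound: s[j]·(b-(j+1)) ≤ Σ_{j+1 ≤ m < b} s[m]   (needs j ≤ b and monotonicity)
theorem psum_lower (s : List Int)
    (hmono : ∀ p q : Nat, p ≤ q → q < s.length → s.getD p 0 ≤ s.getD q 0)
    (j b : Nat) (hjb : j ≤ b) (hb : b ≤ s.length) :
    s.getD j 0 * ((b : Int) - ((j : Int) + 1)) ≤ Psum s b - Psum s (j + 1) := by
  rcases Nat.eq_or_lt_of_le hjb with rfl | hlt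
  · rw [Psum_succ]; nlinarith [le_refl (s.getD j 0)]
  · have := psum_ge_const s (s.getD j 0) (j + 1) b (by omega)
      (fun m hm1 hm2 => hmono j m (by omega) (by omega))
    push_cast at this ⊢; linarith

-- upper bound: Σ_{j+1 ≤ m < b} s[m] ≤ s[b]·(b-(j+1))
theorem psum_upper (s : List Int)
    (hmono : ∀ p q : Nat, p ≤ q → q < s.length → s.getD p 0 ≤ s.getD q 0)
    (j b : Nat) (hjb : j ≤ b) (hb : b < s.length) :
    Psum s b - Psum s (j + 1) ≤ s.getD b 0 * ((b : Int) - ((j : Int) + 1)) := by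
  rcases Nat.eq_or_lt_of_le hjb with rfl | hlt
  · rw [Psum_succ]; nlinarith [le_refl (s.getD j 0)]
  · have := psum_le_const s (s.getD b 0) (j + 1) b (by omega)
      (fun m hm1 hm2 => hmono m b (by omega) hb)
    push_cast at this ⊢; linarith

-- running value of A's first loop, expressed in closed form
def Cacc (s : List Int) (K j : Nat) : Int :=
  ((j : Int) + 1) * (Psum s K - Psum s (j + 1)) + 2 * Qgen 0 s (j + 1)
  - ((K : Int) - 1) * Psum s (j + 1)

theorem Cacc_last (s : List Int) (K : Nat) (hK : 1 ≤ K) : Cacc s K (K - 1) = Fwin s K 0 := by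
  have h : K - 1 + 1 = K := by omega
  unfold Cacc Fwin
  rw [h]; simp [Psum, Qgen]

theorem Fwin_step (s : List Int) (K j : Nat) :
    Fwin s K (j + 1) = Fwin s K j + ((K : Int) - 1) * (s.getD j 0 + s.getD (K + j) 0)
      - 2 * (Psum s (K + j) - Psum s (j + 1)) := by
  have h1 : j + 1 + K = (K + j) + 1 := by omega
  have h2 : j + K = K + j := by omega
  unfold Fwin
  rw [h1, h2, Psum_succ, Qgen_succ, Psum_succ s j, Qgen_succ 0 s j]
  push_cast; ring

theorem Cacc_zero (s : List Int) (K : Nat) :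
    Cacc s K 0 = Psum s K - Psum s 1 - s.getD 0 0 * ((K : Int) - 1) := by
  unfold Cacc
  rw [show (0:Nat) + 1 = 1 from rfl]
  have h1 : Psum s 1 = s.getD 0 0 := by simp [Psum]
  have h2 : Qgen 0 s 1 = 0 := by simp [Qgen]
  rw [h1, h2]; push_cast; ring

theorem Cacc_step (s : List Int) (K j : Nat) :
    Cacc s K (j + 1)
      = Cacc s K j + (Psum s K - Psum s (j + 2) - s.getD (j + 1) 0 * ((K : Int) - ((j : Int) + 2))) := by
  unfold Cacc
  rw [show j + 1 + 1 = j + 2 from rfl, Psum_succ s (j + 1), Qgen_succ 0 s (j + 1)]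
  push_cast; ring

theorem loop1_inv (s : List Int) (k : Int) (K : Nat) (hk : k = (K : Nat))
    (hmono : ∀ p q : Nat, p ≤ q → q < s.length → s.getD p 0 ≤ s.getD q 0)
    (hKn : K ≤ s.length) :
    ∀ (j : Nat), j < K → ∀ (d : Int),
      (PySem.List.pyRange (j : Int) (-1) (-1)).foldl
        (fun (st : Int × Int) i =>
          (st.1 + PySem.List.pyGetD s i 0,
           st.2 + |PySem.List.pyGetD s i 0 * (k - 1 - i) - st.1|)) (Psum s K - Psum s (j + 1), d)
      = (Psum s K, d + Cacc s K j) := by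
  intro j
  induction j with
  | zero =>
    intro hj d
    rw [show ((0:Nat):Int) = 0 from rfl,
        PySem.List.pyRange_neg_one_cons (by omega : (-1:Int) < 0),
        show (0:Int) - 1 = -1 from rfl,
        PySem.List.pyRange_neg_one_eq_nil (by omega : (-1:Int) ≤ -1)]
    simp only [List.foldl_cons, List.foldl_nil, PySem.List.pyGetD_zero]
    have hlow := psum_lower s hmono 0 K (by omega) hKn
    have habs : |s.getD 0 0 * (k - 1 - 0) - (Psum s K - Psum s (0 + 1))|
        = Psum s K - Psum s 1 - s.getD 0 0 * ((K : Int) - 1) := by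
      rw [hk]
      rw [abs_of_nonpos (by push_cast at hlow ⊢; linarith)]
      push_cast; ring
    rw [habs]
    have h1 : Psum s 1 = Psum s 0 + s.getD 0 0 := Psum_succ s 0
    have h0 : Psum s 0 = 0 := by simp [Psum]
    rw [Cacc_zero]
    have hfst : Psum s K - Psum s (0 + 1) + s.getD 0 0 = Psum s K := by
      rw [show (0:Nat) + 1 = 1 from rfl, h1, h0]; ring
    rw [hfst]
  | succ j ihj =>
    intro hj d
    rw [show ((j + 1 : Nat) : Int) = (j : Int) + 1 by push_cast; ring,
        PySem.List.pyRange_neg_one_cons (by omega : (-1:Int) < (j : Int) + 1),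
        show ((j : Int) + 1) - 1 = (j : Int) by ring]
    simp only [List.foldl_cons]
    have hget : PySem.List.pyGetD s ((j : Int) + 1) 0 = s.getD (j + 1) 0 := by
      rw [show ((j : Int) + 1) = ((j + 1 : Nat) : Int) by push_cast; ring, PySem.List.pyGetD_natCast]
    have hlow := psum_lower s hmono (j + 1) K (by omega) hKn
    have habs : |s.getD (j + 1) 0 * (k - 1 - ((j : Int) + 1)) - (Psum s K - Psum s (j + 1 + 1))|
        = Psum s K - Psum s (j + 2) - s.getD (j + 1) 0 * ((K : Int) - ((j : Int) + 2)) := by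
      rw [hk, show j + 1 + 1 = j + 2 from rfl]
      rw [abs_of_nonpos (by push_cast at hlow ⊢; linarith)]
      ring
    rw [hget, habs]
    have hstate : Psum s K - Psum s (j + 1 + 1) + s.getD (j + 1) 0 = Psum s K - Psum s (j + 1) := by
      rw [Psum_succ s (j + 1)]; ring
    rw [hstate, ihj (by omega) _]
    rw [Cacc_step]
    simp only [Prod.mk.injEq]
    exact ⟨trivial, by ring⟩

theorem loop2_inv (s : List Int) (k : Int) (K : Nat) (hk : k = (K : Nat))
    (hmono : ∀ p q : Nat, p ≤ q → q < s.length → s.getD p 0 ≤ s.getD q 0) :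
    ∀ (m j : Nat) (r : Int), K + j + m ≤ s.length →
      (PySem.List.pyRange ((K + j : Nat) : Int) ((K + j + m : Nat) : Int) 1).foldl
        (fun (st : Int × Int × Int) i =>
          let t := st.1 - PySem.List.pyGetD s (i - k) 0
          let d := st.2.1 - |t - PySem.List.pyGetD s (i - k) 0 * (k - 1)|
                          + |t - PySem.List.pyGetD s i 0 * (k - 1)|
          (t + PySem.List.pyGetD s i 0, d, min st.2.2 d))
        (Psum s (K + j) - Psum s j, Fwin s K j, r)
      = (Psum s (K + j + m) - Psum s (j + m), Fwin s K (j + m),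
         (List.range m).foldl (fun a t => min a (Fwin s K (j + 1 + t))) r) := by
  intro m
  induction m with
  | zero =>
    intro j r hle
    rw [PySem.List.pyRange_one_eq_nil (by push_cast; omega)]
    simp
  | succ m ihm =>
    intro j r hle
    rw [PySem.List.pyRange_one_cons (by push_cast; omega)]
    simp only [List.foldl_cons]
    have hik : ((K + j : Nat) : Int) - k = (j : Int) := by rw [hk]; push_cast; ring
    have hgj : PySem.List.pyGetD s (((K + j : Nat) : Int) - k) 0 = s.getD j 0 := by
      rw [hik, PySem.List.pyGetD_natCast]
    have hgi : PySem.List.pyGetD s ((K + j : Nat) : Int) 0 = s.getD (K + j) 0 :=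
      PySem.List.pyGetD_natCast s (K + j) 0
    have ht : Psum s (K + j) - Psum s j - s.getD j 0 = Psum s (K + j) - Psum s (j + 1) := by
      rw [Psum_succ s j]; ring
    have hlow := psum_lower s hmono j (K + j) (by omega) (by omega)
    have hupp := psum_upper s hmono j (K + j) (by omega) (by omega)
    have habs1 : |Psum s (K + j) - Psum s (j + 1) - s.getD j 0 * (k - 1)|
        = Psum s (K + j) - Psum s (j + 1) - s.getD j 0 * ((K : Int) - 1) := by
      rw [hk, abs_of_nonneg (by push_cast at hlow ⊢; nlinarith)]
    have habs2 : |Psum s (K + j) - Psum s (j + 1) - s.getD (K + j) 0 * (k - 1)|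
        = s.getD (K + j) 0 * ((K : Int) - 1) - (Psum s (K + j) - Psum s (j + 1)) := by
      rw [hk, abs_of_nonpos (by push_cast at hupp ⊢; nlinarith)]
      ring
    have hd : Fwin s K j - (Psum s (K + j) - Psum s (j + 1) - s.getD j 0 * ((K : Int) - 1))
            + (s.getD (K + j) 0 * ((K : Int) - 1) - (Psum s (K + j) - Psum s (j + 1)))
        = Fwin s K (j + 1) := by
      rw [Fwin_step]; ring
    have hst : Psum s (K + j) - Psum s (j + 1) + s.getD (K + j) 0
        = Psum s (K + (j + 1)) - Psum s (j + 1) := by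
      rw [show K + (j + 1) = (K + j) + 1 by omega, Psum_succ s (K + j)]; ring
    rw [hgj, hgi, ht, habs1, habs2, hd, hst]
    have hrange : ((K + j : Nat) : Int) + 1 = ((K + (j + 1) : Nat) : Int) := by push_cast; ring
    have hrange2 : ((K + j + (m + 1) : Nat) : Int) = ((K + (j + 1) + m : Nat) : Int) := by
      push_cast; ring
    rw [hrange, hrange2, ihm (j + 1) (min r (Fwin s K (j + 1))) (by omega)]
    have e1 : K + (j + 1) + m = K + j + (m + 1) := by omega
    have e2 : j + 1 + m = j + (m + 1) := by omega
    rw [e1, e2]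
    simp only [Prod.mk.injEq]
    refine ⟨trivial, trivial, ?_⟩
    rw [List.range_succ_eq_map, List.foldl_cons, List.foldl_map]
    simp only [Nat.add_zero, Nat.succ_eq_add_one]
    refine PySem.List.foldl_congr_mem _ _ _ _ ?_
    intro a t _
    rw [show j + 1 + 1 + t = j + 1 + (t + 1) by omega]

-- B's prefix-list builder, characterized
def pList (c : Int) (s : List Int) : List Int :=
  match s with
  | [] => [c]
  | x :: t => c :: pList (c + x) t

def qList (b c : Int) (s : List Int) : List Int :=
  match s with
  | [] => [c]
  | x :: t => c :: qList (b + 1) (c + b * x) t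

theorem build_pq (s : List Int) :
    ∀ (b : Int) (a1 a2 : List Int) (c1 c2 : Int),
      (PySem.List.enumerate s b).foldl
        (fun (pq : List Int × List Int) ip =>
          (pq.1 ++ [PySem.List.pyGetD pq.1 (-1) 0 + ip.2],
           pq.2 ++ [PySem.List.pyGetD pq.2 (-1) 0 + ip.1 * ip.2])) (a1 ++ [c1], a2 ++ [c2])
      = (a1 ++ pList c1 s, a2 ++ qList b c2 s) := by
  induction s with
  | nil => intro b a1 a2 c1 c2; simp [PySem.List.enumerate_nil, pList, qList]
  | cons x t ih =>
    intro b a1 a2 c1 c2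
    rw [PySem.List.enumerate_cons, List.foldl_cons]
    simp only [PySem.List.pyGetD_neg_one_append_singleton]
    rw [show a1 ++ [c1] ++ [c1 + x] = (a1 ++ [c1]) ++ [c1 + x] from rfl,
        show a2 ++ [c2] ++ [c2 + b * x] = (a2 ++ [c2]) ++ [c2 + b * x] from rfl,
        ih (b + 1) (a1 ++ [c1]) (a2 ++ [c2]) (c1 + x) (c2 + b * x)]
    simp [pList, qList]

theorem pList_getD (s : List Int) : ∀ (c : Int) (m : Nat), m ≤ s.length →
    (pList c s).getD m 0 = c + Psum s m := by
  induction s with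
  | nil =>
    intro c m hm
    have hm0 : m = 0 := by simpa using hm
    subst hm0; simp [pList, Psum]
  | cons x t ih =>
    intro c m hm
    cases m with
    | zero => simp [pList, Psum]
    | succ m =>
      rw [pList, List.getD_cons_succ, ih (c + x) m (by simpa using hm), Psum_cons]
      ring

theorem qList_getD (s : List Int) : ∀ (b c : Int) (m : Nat), m ≤ s.length →
    (qList b c s).getD m 0 = c + Qgen b s m := by
  induction s with
  | nil =>
    intro b c m hm
    have hm0 : m = 0 := by simpa using hm
    subst hm0; simp [qList, Qgen]
  | cons x t ih =>
    intro b c m hm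
    cases m with
    | zero => simp [qList, Qgen]
    | succ m =>
      rw [qList, List.getD_cons_succ, ih (b + 1) (c + b * x) m (by simpa using hm), Qgen_cons]
      ring

-- B's per-window formula equals Fwin
theorem G_eq (s : List Int) (k : Int) (K : Nat) (hk : k = (K : Int)) (jn : Nat)
    (hjn : jn + K ≤ s.length) :
    2 * (PySem.List.pyGetD (qList 0 0 s) ((jn : Int) + k) 0 - PySem.List.pyGetD (qList 0 0 s) (jn : Int) 0)
      - (2 * (jn : Int) + k - 1) * (PySem.List.pyGetD (pList 0 s) ((jn : Int) + k) 0 - PySem.List.pyGetD (pList 0 s) (jn : Int) 0)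
    = Fwin s K jn := by
  have e : (jn : Int) + k = ((jn + K : Nat) : Int) := by rw [hk]; push_cast; ring
  rw [e, PySem.List.pyGetD_natCast, PySem.List.pyGetD_natCast,
      PySem.List.pyGetD_natCast, PySem.List.pyGetD_natCast,
      qList_getD s 0 0 (jn + K) hjn, qList_getD s 0 0 jn (by omega),
      pList_getD s 0 (jn + K) hjn, pList_getD s 0 jn (by omega)]
  unfold Fwin
  rw [hk]; ring


-- ===== VERDICT (by name: the statement is the Claim_ definition above) =====
theorem angryChildren_spec : Claim_equal_angryChildren := by
  intro k packets _ hpre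
  obtain ⟨hk0, hkn⟩ := hpre
  unfold Spec_angryChildren angryChildren angryChildren_alt
  dsimp only
  set s := PySem.List.sorted packets (fun x => x) false with hs
  have hlen : s.length = packets.length := PySem.List.length_sorted packets (fun x => x) false
  set K := k.toNat with hKdef
  have hk : k = (K : Int) := (Int.toNat_of_nonneg hk0).symm
  have hKn : K ≤ s.length := by omega
  have hmono : ∀ p q : Nat, p ≤ q → q < s.length → s.getD p 0 ≤ s.getD q 0 := by
    intro p q hpq hq
    rw [List.getD_eq_getElem s 0 (lt_of_le_of_lt hpq hq), List.getD_eq_getElem s 0 hq]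
    exact PySem.List.sorted_id_getElem_mono packets hpq hq
  set M := s.length - K with hM
  -- A's first loop
  have hinit : (PySem.List.pyRange (k - 1) (-1) (-1)).foldl
      (fun (st : Int × Int) i =>
        (st.1 + PySem.List.pyGetD s i 0,
         st.2 + |PySem.List.pyGetD s i 0 * (k - 1 - i) - st.1|)) (0, 0)
      = (Psum s K, Fwin s K 0) := by
    rcases Nat.eq_zero_or_pos K with hK0 | hK1
    · rw [hk, hK0]
      rw [show ((0:Nat):Int) - 1 = -1 from rfl,
          PySem.List.pyRange_neg_one_eq_nil (by omega : (-1:Int) ≤ -1)]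
      simp [Psum, Fwin, Qgen]
    · have h1 : k - 1 = ((K - 1 : Nat) : Int) := by omega
      have h2 := loop1_inv s k K hk hmono hKn (K - 1) (by omega) 0
      rw [show K - 1 + 1 = K by omega, sub_self, h1] at h2
      rw [h1, h2, zero_add, Cacc_last s K hK1]
  rw [hinit]
  -- A's second loop
  have h5 := loop2_inv s k K hk hmono M 0 (Fwin s K 0) (by omega)
  rw [show (K + 0 : Nat) = K from rfl, show Psum s 0 = 0 by simp [Psum], sub_zero] at h5
  rw [hk] at h5 ⊢
  have h4 : ((s.length : Nat) : Int) = ((K + M : Nat) : Int) := by omega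
  rw [h4]
  dsimp only at h5 ⊢
  rw [h5]
  dsimp only
  -- B's side
  have hbuild := build_pq s 0 [] [] 0 0
  simp only [List.nil_append] at hbuild
  rw [hbuild]
  dsimp only
  have h6 : ((K + M : Nat) : Int) - (K : Int) + 1 = ((M + 1 : Nat) : Int) := by push_cast; ring
  rw [h6, PySem.List.pyRange_one 0 ((M + 1 : Nat) : Int),
      show (((M + 1 : Nat) : Int) - 0).toNat = M + 1 by omega,
      List.range_succ_eq_map, List.map_cons, List.map_map, List.map_cons, List.map_map]
  simp only [zero_add, Nat.cast_zero]
  rw [PySem.List.min?_id_cons, Option.getD_some]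
  rw [List.foldl_map]
  have hG0 := G_eq s ((K : Nat) : Int) K rfl 0 (by omega)
  simp only [Nat.cast_zero, zero_add] at hG0
  rw [hG0]
  refine PySem.List.foldl_congr_mem _ _ _ _ ?_
  intro a t ht
  have htM : t < M := List.mem_range.mp ht
  have hGt := G_eq s ((K : Nat) : Int) K rfl (t + 1) (by omega)
  simp only [Function.comp_apply, Nat.succ_eq_add_one]
  rw [show 1 + t = t + 1 by omega, ← hGt]
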